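-- pv_equiv track=rewrite | github.com/Devendrajjw/lab1dsa1 | dsa/chunkGenerator.py | even_number_in_chunks
-- ===== SOURCE A (Python) =====
-- def even_number_in_chunks(narr, list_size=2):
--     even_list = []
--     for n in narr:
--         if n % 2 == 0:
--             even_list.append(n)
--             if len(even_list) == list_size:
--                 yield even_list
--                 even_list = []
--     if even_list:
--         yield even_list
-- ===== SOURCE B (Python) =====
-- def even_number_in_chunks(narr, list_size=2):
--     evens = [n for n in narr if n % 2 == 0]
--     for i in range(0, len(evens), list_size):
--         yield evens[i:i + list_size]
-- ===== Notes on version B (the rewrite author's own statement) =====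
-- stated objective: simpler
-- what changed: Replaces the incremental buffer-accumulate-and-reset generator with a single filter comprehension followed by stride slicing over the collected evens.
-- outside the precondition, e.g. on even_number_in_chunks([2, 4], 0): A returns [[2, 4]], B raises ValueError; on even_number_in_chunks([2, 4], -1): A returns [[2, 4]], B returns []
import Mathlib
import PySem

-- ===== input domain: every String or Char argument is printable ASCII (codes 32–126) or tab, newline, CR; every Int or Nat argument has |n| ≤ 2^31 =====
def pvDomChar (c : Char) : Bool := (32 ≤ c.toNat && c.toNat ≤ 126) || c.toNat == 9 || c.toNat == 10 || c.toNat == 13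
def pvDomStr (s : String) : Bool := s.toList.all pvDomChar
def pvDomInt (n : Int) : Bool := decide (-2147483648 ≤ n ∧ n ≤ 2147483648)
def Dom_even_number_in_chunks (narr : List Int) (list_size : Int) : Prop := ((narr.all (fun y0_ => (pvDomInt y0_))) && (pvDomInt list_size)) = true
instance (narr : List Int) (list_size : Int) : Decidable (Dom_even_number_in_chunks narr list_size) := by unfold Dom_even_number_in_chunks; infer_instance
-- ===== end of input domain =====

-- B replaces A's incremental buffer-accumulate-and-reset loop with a filter pass
-- followed by stride slicing over the collected evens (objective: simpler).


-- ===== PORT A =====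
-- one loop step of A: append an even n to the buffer, emit the buffer when it reaches list_size
def pvStepA (list_size : Int) (s : List (List Int) × List Int) (n : Int) : List (List Int) × List Int :=
  if PySem.Int.mod n 2 == 0 then
    let buf := s.2 ++ [n]
    if (buf.length : Int) == list_size then (s.1 ++ [buf], []) else (s.1, buf)
  else s

def even_number_in_chunks (narr : List Int) (list_size : Int) : List (List Int) :=
  let r := narr.foldl (pvStepA list_size) ([], [])
  if r.2.isEmpty then r.1 else r.1 ++ [r.2]

-- ===== PORT B =====
def even_number_in_chunks_alt (narr : List Int) (list_size : Int) : List (List Int) :=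
  let evens := narr.filter (fun n => PySem.Int.mod n 2 == 0)
  (PySem.List.pyRange 0 (evens.length : Int) list_size).map
    (fun i => PySem.List.slice evens (some i) (some (i + list_size)))

-- ===== PRECONDITION & SPEC =====
-- Pre_ excludes nonpositive chunk sizes, a corner no caller would specify: there A's
-- chunk-full equality test can never fire so A happens to emit all evens as one trailing
-- chunk, while B's range iteration raises ValueError (step 0) or emits nothing (negative step).
def Pre_even_number_in_chunks (narr : List Int) (list_size : Int) : Prop := 1 ≤ list_size
instance (narr : List Int) (list_size : Int) : Decidable (Pre_even_number_in_chunks narr list_size) := by unfold Pre_even_number_in_chunks; infer_instance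

def pvWitness_even_number_in_chunks : List Int × Int := ([2, 3, 4, 6, 8], 2)

def Spec_even_number_in_chunks (narr : List Int) (list_size : Int) (out : List (List Int)) : Prop := out = even_number_in_chunks_alt narr list_size
instance (narr : List Int) (list_size : Int) (out : List (List Int)) : Decidable (Spec_even_number_in_chunks narr list_size out) := by unfold Spec_even_number_in_chunks; infer_instance

-- ===== CLAIM (what is proved, stated in full; the proofs are below) =====
def Claim_equal_even_number_in_chunks : Prop := ∀ (narr : List Int) (list_size : Int), Dom_even_number_in_chunks narr list_size → Pre_even_number_in_chunks narr list_size → Spec_even_number_in_chunks narr list_size (even_number_in_chunks narr list_size)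

-- ===== LEMMAS AND PROOFS =====

-- canonical chunking: split a list into consecutive blocks of k+1 elements (last may be short)
def pvChunks (k : Nat) : List Int → List (List Int)
  | [] => []
  | x :: xs => ((x :: xs).take (k + 1)) :: pvChunks k ((x :: xs).drop (k + 1))
termination_by l => l.length
decreasing_by simp only [List.length_drop, List.length_cons]; omega

-- unfolding equations of pvChunks
theorem pvChunks_nil (k : Nat) : pvChunks k [] = [] := by
  rw [pvChunks.eq_def]

theorem pvChunks_cons (k : Nat) (x : Int) (xs : List Int) :
    pvChunks k (x :: xs) = ((x :: xs).take (k + 1)) :: pvChunks k ((x :: xs).drop (k + 1)) := by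
  rw [pvChunks.eq_def]

-- A's step skips odd elements, so the fold over narr is the fold over the filtered list
theorem pvFoldA_filter (ls : Int) (narr : List Int) (s : List (List Int) × List Int) :
    narr.foldl (pvStepA ls) s = (narr.filter (fun n => PySem.Int.mod n 2 == 0)).foldl (pvStepA ls) s := by
  induction narr generalizing s with
  | nil => rfl
  | cons n t ih =>
    simp only [List.foldl_cons, List.filter_cons]
    by_cases h : (PySem.Int.mod n 2 == 0) = true
    · rw [if_pos h, List.foldl_cons]
      exact ih _
    · rw [if_neg h, show pvStepA ls s n = s from by unfold pvStepA; rw [if_neg h]]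
      exact ih s

-- loop invariant for A's fold over a list of evens, buffer shorter than the chunk size:
-- the invariant regroups buf ++ e from scratch, valid because buf holds fewer than k+1 elements
theorem pvFoldA_chunks (k : Nat) (e : List Int) (out : List (List Int)) (buf : List Int)
    (hb : buf.length ≤ k)
    (he : ∀ n ∈ e, (PySem.Int.mod n 2 == 0) = true) :
    (let r := e.foldl (pvStepA ((k : Int) + 1)) (out, buf)
     if r.2.isEmpty then r.1 else r.1 ++ [r.2]) = out ++ pvChunks k (buf ++ e) := by
  induction e generalizing out buf with
  | nil =>
    cases buf with
    | nil => simp [pvChunks_nil]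
    | cons b bs =>
      rw [List.append_nil, pvChunks_cons]
      have h1 : (b :: bs).take (k + 1) = b :: bs :=
        List.take_of_length_le (by omega)
      have h2 : (b :: bs).drop (k + 1) = [] :=
        List.drop_eq_nil_of_le (by omega)
      simp [h1, h2, pvChunks_nil]
  | cons m t ih =>
    have hn := he m (List.mem_cons_self ..)
    have ht : ∀ x ∈ t, (PySem.Int.mod x 2 == 0) = true := fun x hx => he x (List.mem_cons_of_mem _ hx)
    have hstep : pvStepA ((k : Int) + 1) (out, buf) m
        = if buf.length = k then (out ++ [buf ++ [m]], ([] : List Int)) else (out, buf ++ [m]) := by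
      unfold pvStepA
      rw [if_pos hn]
      by_cases hfull : buf.length = k
      · simp [hfull]
      · simp [hfull]
    simp only [List.foldl_cons, hstep]
    by_cases hfull : buf.length = k
    · rw [if_pos hfull, ih _ _ (by simp) ht]
      have hlen : (buf ++ [m]).length = k + 1 := by simp [hfull]
      have hch : pvChunks k (buf ++ m :: t) = (buf ++ [m]) :: pvChunks k t := by
        rw [show buf ++ m :: t = (buf ++ [m]) ++ t by simp]
        cases h' : (buf ++ [m]) ++ t with
        | nil => simp at h'
        | cons y ys =>
          rw [pvChunks_cons, ← h', ← hlen, List.take_left, List.drop_left]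
      rw [hch]
      simp
    · rw [if_neg hfull, ih _ _ (by simp; omega) ht]
      simp

-- range(0, L, s) with 0 < s, 0 < L starts at 0 and continues as s + range(0, L-s, s)
theorem pvRange_cons (s L : Int) (hs : 0 < s) (hL : 0 < L) :
    PySem.List.pyRange 0 L s = 0 :: (PySem.List.pyRange 0 (L - s) s).map (· + s) := by
  rw [PySem.List.pyRange_of_pos 0 L hs, PySem.List.pyRange_of_pos 0 (L - s) hs]
  have hdiv : (L + s - 1) / s = (L - 1) / s + 1 := by
    have := Int.add_mul_ediv_right (L - 1) 1 (by omega : s ≠ 0)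
    rw [show L + s - 1 = L - 1 + 1 * s by ring, this]
  by_cases hLs : 0 < L - s
  · have hnn : 0 ≤ (L - 1) / s := Int.ediv_nonneg (by omega) (by omega)
    have hcnt : ((L - 0 + s - 1) / s).toNat = ((L - s - 0 + s - 1) / s).toNat + 1 := by
      rw [show L - 0 + s - 1 = L + s - 1 by ring, show L - s - 0 + s - 1 = L - 1 by ring, hdiv]
      omega
    rw [if_pos hL, if_pos hLs, hcnt, List.range_succ_eq_map, List.map_cons, List.map_map, List.map_map]
    congr 1
    · norm_num
    · exact List.map_congr_left (fun j _ => by simp [Function.comp_apply]; ring)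
  · have hz : (L - 1) / s = 0 := Int.ediv_eq_zero_of_lt (by omega) (by omega)
    have hcnt : ((L - 0 + s - 1) / s).toNat = 1 := by
      rw [show L - 0 + s - 1 = L + s - 1 by ring, hdiv, hz]
      rfl
    rw [if_pos hL, if_neg hLs, hcnt]
    simp [List.range_succ]

-- pyRange with a nonpositive stop is empty (positive step)
theorem pvRange_nil (s L : Int) (hs : 0 < s) (hL : L ≤ 0) :
    PySem.List.pyRange 0 L s = [] := by
  rw [PySem.List.pyRange_of_pos 0 L hs, if_neg (by omega)]
  simp

-- B's slicing loop computes the canonical chunking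
theorem pvAlt_chunks (k : Nat) (e : List Int) :
    (PySem.List.pyRange 0 (e.length : Int) ((k : Int) + 1)).map
      (fun i => PySem.List.slice e (some i) (some (i + ((k : Int) + 1)))) = pvChunks k e := by
  generalize hM : e.length = M
  induction M using Nat.strong_induction_on generalizing e with
  | _ M ih =>
  subst hM
  cases e with
  | nil =>
    rw [show (([] : List Int).length : Int) = 0 by simp, pvRange_nil _ _ (by omega) le_rfl]
    simp [pvChunks_nil]
  | cons x xs =>
    have hs : (0 : Int) < (k : Int) + 1 := by omega
    have hL : (0 : Int) < ((x :: xs).length : Int) := by simp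
    rw [pvRange_cons _ _ hs hL, List.map_cons, List.map_map]
    have hcc : (x :: xs).length = xs.length + 1 := rfl
    have hhead : PySem.List.slice (x :: xs) (some 0) (some (0 + ((k : Int) + 1))) = (x :: xs).take (k + 1) := by
      rw [PySem.List.slice_zero_start, PySem.List.slice_to _ (by omega)]
      congr 1
      omega
    have htail_range : PySem.List.pyRange 0 (((x :: xs).length : Int) - ((k : Int) + 1)) ((k : Int) + 1)
        = PySem.List.pyRange 0 (((x :: xs).drop (k + 1)).length : Int) ((k : Int) + 1) := by
      by_cases hlong : k + 1 ≤ (x :: xs).length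
      · have h1 : (((x :: xs).drop (k + 1)).length : Int) = ((x :: xs).length : Int) - ((k : Int) + 1) := by
          simp only [List.length_drop]
          omega
        rw [h1]
      · rw [pvRange_nil _ _ hs (by omega),
            pvRange_nil _ _ hs (by simp only [List.length_drop]; omega)]
    have htail : ((PySem.List.pyRange 0 (((x :: xs).length : Int) - ((k : Int) + 1)) ((k : Int) + 1)).map
        ((fun i => PySem.List.slice (x :: xs) (some i) (some (i + ((k : Int) + 1)))) ∘ (· + ((k : Int) + 1))))
        = pvChunks k ((x :: xs).drop (k + 1)) := by
      rw [htail_range]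
      rw [List.map_congr_left (l := PySem.List.pyRange 0 (((x :: xs).drop (k + 1)).length : Int) ((k : Int) + 1))
        (f := (fun i => PySem.List.slice (x :: xs) (some i) (some (i + ((k : Int) + 1)))) ∘ (· + ((k : Int) + 1)))
        (g := fun i => PySem.List.slice ((x :: xs).drop (k + 1)) (some i) (some (i + ((k : Int) + 1))))
        ?_]
      · exact ih _ (by simp only [List.length_drop, List.length_cons]; omega) _ rfl
      · intro i hi
        have hi0 : 0 ≤ i := by
          rcases (PySem.List.mem_pyRange_iff_of_pos hs i).mp hi with ⟨h1, _⟩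
          exact h1
        simp only [Function.comp_apply]
        rw [PySem.List.slice_toNat _ (by omega) (by omega),
            PySem.List.slice_toNat _ (by omega) (by omega)]
        rw [show (i + ((k : Int) + 1)).toNat = i.toNat + (k + 1) by omega,
            show (i + ((k : Int) + 1) + ((k : Int) + 1)).toNat = (i.toNat + (k + 1)) + (k + 1) by omega]
        simp only [List.drop_drop]
        congr 1
        · omega
        · congr 1
          omega
    rw [hhead, htail, pvChunks_cons]

-- ===== VERDICT (by name: the statement is the Claim_ definition above) =====
theorem even_number_in_chunks_spec : Claim_equal_even_number_in_chunks := by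
  intro narr list_size _ hpre
  unfold Spec_even_number_in_chunks even_number_in_chunks even_number_in_chunks_alt
  obtain ⟨k, hk⟩ : ∃ k : Nat, list_size = (k : Int) + 1 :=
    ⟨(list_size - 1).toNat, by unfold Pre_even_number_in_chunks at hpre; omega⟩
  subst hk
  rw [pvFoldA_filter]
  have := pvFoldA_chunks k (narr.filter (fun n => PySem.Int.mod n 2 == 0)) [] []
    (by simp) (fun n hn => (List.mem_filter.mp hn).2)
  simp only [List.nil_append] at this
  rw [this, pvAlt_chunks k (narr.filter (fun n => PySem.Int.mod n 2 == 0))]
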